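-- pv_equiv track=rewrite | github.com/simonwagner/mergepbx | test/test_pbxmerge.py | load_merge_task
-- ===== SOURCE A (Python) =====
-- def first(iterable, predicate, default=None):
--     for item in iterable:
--         if predicate(item):
--             return item
--     return default
--
-- def load_merge_task(files_to_be_merged):
--     postfixes = (".base", ".mine", ".theirs", ".merged")
--
--     base, mine, theirs, merged = (first(
--                                     files_to_be_merged,
--                                     lambda file: file.endswith(postfix),
--                                     None)
--                                   for postfix
--                                   in postfixes)
--     return (base, mine, theirs, merged)
-- ===== SOURCE B (Python) =====
-- def load_merge_task(files_to_be_merged):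
--     postfixes = (".base", ".mine", ".theirs", ".merged")
--     results = {}
--     for file in files_to_be_merged:
--         for postfix in postfixes:
--             if file.endswith(postfix) and postfix not in results:
--                 results[postfix] = file
--                 break
--     return (results.get(".base"), results.get(".mine"),
--             results.get(".theirs"), results.get(".merged"))
-- ===== Notes on version B (the rewrite author's own statement) =====
-- stated objective: alternative
-- what changed: Replaces four independent first-match scans of the list (one per postfix) by a single pass that builds a dict keyed by postfix, storing a file only when its slot is still unset, then reads the four slots.
import Mathlib
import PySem

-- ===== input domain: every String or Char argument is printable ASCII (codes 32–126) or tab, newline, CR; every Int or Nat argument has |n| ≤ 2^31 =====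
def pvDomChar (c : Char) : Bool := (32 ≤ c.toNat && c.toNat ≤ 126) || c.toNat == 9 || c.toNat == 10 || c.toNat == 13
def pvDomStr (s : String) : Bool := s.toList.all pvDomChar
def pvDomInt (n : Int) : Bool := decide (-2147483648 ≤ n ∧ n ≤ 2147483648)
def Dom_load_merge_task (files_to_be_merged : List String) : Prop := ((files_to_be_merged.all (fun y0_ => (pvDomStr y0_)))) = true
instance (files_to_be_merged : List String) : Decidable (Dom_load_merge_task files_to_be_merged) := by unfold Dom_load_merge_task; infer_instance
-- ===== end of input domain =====

-- B replaces A's four independent first-match scans by one pass building a postfix-keyed dict (alternative decomposition, same cost).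

-- ===== PORT A =====
def pvFirst (iterable : List String) (predicate : String → Bool) (default : Option String) : Option String :=
  match iterable with
  | [] => default
  | item :: rest => if predicate item then some item else pvFirst rest predicate default

def load_merge_task (files_to_be_merged : List String) : Option String × Option String × Option String × Option String :=
  (pvFirst files_to_be_merged (fun file => PySem.Str.endswith file ".base") none,
   pvFirst files_to_be_merged (fun file => PySem.Str.endswith file ".mine") none,
   pvFirst files_to_be_merged (fun file => PySem.Str.endswith file ".theirs") none,
   pvFirst files_to_be_merged (fun file => PySem.Str.endswith file ".merged") none)

-- ===== PORT B =====
-- inner 'for postfix in postfixes: if … : results[postfix] = file; break'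
def pvTryPostfixes (results : PySem.Dict String String) (file : String) : List String → PySem.Dict String String
  | [] => results
  | pfx :: rest =>
      if PySem.Str.endswith file pfx && !(results.contains pfx) then
        results.insert pfx file
      else
        pvTryPostfixes results file rest

def load_merge_task_alt (files_to_be_merged : List String) : Option String × Option String × Option String × Option String :=
  let results := files_to_be_merged.foldl
    (fun results file => pvTryPostfixes results file [".base", ".mine", ".theirs", ".merged"])
    PySem.Dict.empty
  (results.get? ".base", results.get? ".mine", results.get? ".theirs", results.get? ".merged")

-- ===== PRECONDITION & SPEC =====
def Spec_load_merge_task (files_to_be_merged : List String) (out : Option String × Option String × Option String × Option String) : Prop := out = load_merge_task_alt files_to_be_merged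
instance (files_to_be_merged : List String) (out : Option String × Option String × Option String × Option String) : Decidable (Spec_load_merge_task files_to_be_merged out) := by unfold Spec_load_merge_task; infer_instance

-- ===== CLAIM (what is proved, stated in full; the proofs are below) =====
def Claim_equal_load_merge_task : Prop := ∀ (files_to_be_merged : List String), Dom_load_merge_task files_to_be_merged → Spec_load_merge_task files_to_be_merged (load_merge_task files_to_be_merged)

-- ===== LEMMAS AND PROOFS =====

-- no string ends with two distinct, mutually non-suffix, postfixes
lemma pv_excl {f p q : String} (h : PySem.Str.endswith f p = true)
    (hnp : ¬ p.toList <:+ q.toList) (hnq : ¬ q.toList <:+ p.toList) :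
    PySem.Str.endswith f q = false := by
  rw [Bool.eq_false_iff]
  intro hq
  rw [PySem.Str.endswith_eq, PySem.Chars.endswith_iff] at h hq
  rcases List.suffix_or_suffix_of_suffix h hq with h' | h'
  · exact hnp h'
  · exact hnq h'

-- if 'file' matches no postfix in ps (or its slot is taken), the inner loop leaves the dict unchanged
lemma pvTry_id (d : PySem.Dict String String) (f : String) (ps : List String)
    (h : ∀ p ∈ ps, PySem.Str.endswith f p = false ∨ d.contains p = true) :
    pvTryPostfixes d f ps = d := by
  induction ps with
  | nil => rfl
  | cons p rest ih =>
      have hcond : (PySem.Str.endswith f p && !(d.contains p)) = false := by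
        rcases h p (by simp) with hp | hp
        · simp only [hp, Bool.false_and]
        · simp only [hp, Bool.not_true, Bool.and_false]
      simp only [pvTryPostfixes, hcond, Bool.false_eq_true, if_false]
      exact ih (fun q hq => h q (by simp [hq]))

-- the inner loop never touches a key 'file' does not end with
lemma pvTry_get_of_no_match (d : PySem.Dict String String) (f k : String)
    (hk : PySem.Str.endswith f k = false) (ps : List String) :
    (pvTryPostfixes d f ps).get? k = d.get? k := by
  induction ps with
  | nil => rfl
  | cons p rest ih =>
      simp only [pvTryPostfixes]
      by_cases hp : (PySem.Str.endswith f p && !(d.contains p)) = true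
      · rw [if_pos hp]
        have hpk : k ≠ p := by
          intro he
          subst he
          rw [hk] at hp
          simp at hp
        exact PySem.Dict.get?_insert_of_ne d f hpk
      · rw [if_neg hp]
        exact ih

-- if 'file' ends with k ∈ ps and with no other member of ps, the inner loop fills exactly slot k (if empty)
lemma pvTry_get_of_match (d : PySem.Dict String String) (f k : String)
    (hk : PySem.Str.endswith f k = true) (ps : List String)
    (hmem : k ∈ ps) (hex : ∀ p ∈ ps, p ≠ k → PySem.Str.endswith f p = false) :
    (pvTryPostfixes d f ps).get? k = (d.get? k).or (some f) := by
  induction ps with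
  | nil => simp at hmem
  | cons p rest ih =>
      simp only [pvTryPostfixes]
      by_cases hpk : p = k
      · subst hpk
        by_cases hc : d.contains p = true
        · have hcond : (PySem.Str.endswith f p && !(d.contains p)) = false := by
            simp only [hc, Bool.not_true, Bool.and_false]
          rw [hcond]
          simp only [Bool.false_eq_true, if_false]
          have hnone : pvTryPostfixes d f rest = d := by
            apply pvTry_id
            intro q hq
            by_cases hqp : q = p
            · exact Or.inr (hqp ▸ hc)
            · exact Or.inl (hex q (by simp [hq]) hqp)
          have hsome : (d.get? p).isSome := by
            rw [← PySem.Dict.contains_eq_isSome_get?]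
            exact hc
          rcases Option.isSome_iff_exists.mp hsome with ⟨v, hv⟩
          rw [hnone, hv]
          rfl
        · have hcond : (PySem.Str.endswith f p && !(d.contains p)) = true := by
            simp only [hk, Bool.true_and, Bool.not_eq_eq_eq_not, Bool.not_true]
            exact Bool.eq_false_iff.mpr hc
          rw [if_pos hcond]
          have hnone : d.get? p = none := by
            rw [Option.eq_none_iff_forall_ne_some]
            intro v hv
            rw [PySem.Dict.contains_eq_isSome_get?, hv] at hc
            simp at hc
          rw [PySem.Dict.get?_insert_self, hnone]
          rfl
      · have hp : PySem.Str.endswith f p = false :=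
          hex p (by simp) hpk
        have hcond : (PySem.Str.endswith f p && !(d.contains p)) = false := by
          simp only [hp, Bool.false_and]
        rw [hcond]
        simp only [Bool.false_eq_true, if_false]
        have hmem2 : k ∈ rest := by
          rcases List.mem_cons.mp hmem with h | h
          · exact absurd h.symm hpk
          · exact h
        exact ih hmem2 (fun q hq hqk => hex q (by simp [hq]) hqk)

-- no member of the postfix list is a suffix of a different member
lemma pvPfx_excl (f k : String) (hk : k ∈ ([".base", ".mine", ".theirs", ".merged"] : List String)) (h : PySem.Str.endswith f k = true) :
    ∀ p ∈ ([".base", ".mine", ".theirs", ".merged"] : List String), p ≠ k → PySem.Str.endswith f p = false := by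
  intro p hp hpk
  fin_cases hk <;> fin_cases hp <;>
    first
      | (exact absurd rfl hpk)
      | (exact pv_excl h (by decide) (by decide))

-- main loop invariant: the slot of k after the fold is its old value, else the first match in the list
lemma pvFold_get (k : String) (hk : k ∈ ([".base", ".mine", ".theirs", ".merged"] : List String)) :
    ∀ (fs : List String) (d : PySem.Dict String String),
      (fs.foldl (fun d f => pvTryPostfixes d f [".base", ".mine", ".theirs", ".merged"]) d).get? k
        = (d.get? k).or (pvFirst fs (fun f => PySem.Str.endswith f k) none) := by
  intro fs
  induction fs with
  | nil => intro d; simp [pvFirst]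
  | cons f rest ih =>
      intro d
      simp only [List.foldl_cons, pvFirst, ih]
      by_cases hf : PySem.Str.endswith f k = true
      · rw [pvTry_get_of_match d f k hf _ hk (pvPfx_excl f k hk hf), if_pos hf]
        cases d.get? k <;> rfl
      · rw [pvTry_get_of_no_match d f k (Bool.eq_false_iff.mpr hf), if_neg hf]

-- ===== VERDICT (by name: the statement is the Claim_ definition above) =====
theorem load_merge_task_spec : Claim_equal_load_merge_task := by
  intro fs _
  unfold Spec_load_merge_task load_merge_task load_merge_task_alt
  simp only [pvFold_get ".base" (by decide), pvFold_get ".mine" (by decide),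
    pvFold_get ".theirs" (by decide), pvFold_get ".merged" (by decide),
    PySem.Dict.get?_empty, Option.none_or]
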